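-- pv_equiv track=rewrite | github.com/rf-iasys/OEIS | OEIS_A052913.py | A052913
-- ===== SOURCE A (Python) =====
-- def A052913(n):
--     marked = []
--     current = 1
--     k = 1
--
--     while len(marked) < n:
--         marked.append(k)
--         k += k + current + 1
--         current += 2*k
--
--     return marked
-- ===== SOURCE B (Python) =====
-- def A052913(n):
--     # Direct linear recurrence a(i) = 5*a(i-1) - 2*a(i-2), seeds 1, 4.
--     if n <= 0:
--         return []
--     if n == 1:
--         return [1]
--     res = [1, 4]
--     a, b = 4, 1
--     while len(res) < n:
--         a, b = 5 * a - 2 * b, a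
--         res.append(a)
--     return res
-- ===== Notes on version B (the rewrite author's own statement) =====
-- stated objective: simpler
-- what changed: B drops A's auxiliary (k, current) accumulator pair and generates the sequence directly from its linear recurrence a(i)=5*a(i-1)-2*a(i-2) with seeds 1,4, carrying only the last two output terms.
import Mathlib
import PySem

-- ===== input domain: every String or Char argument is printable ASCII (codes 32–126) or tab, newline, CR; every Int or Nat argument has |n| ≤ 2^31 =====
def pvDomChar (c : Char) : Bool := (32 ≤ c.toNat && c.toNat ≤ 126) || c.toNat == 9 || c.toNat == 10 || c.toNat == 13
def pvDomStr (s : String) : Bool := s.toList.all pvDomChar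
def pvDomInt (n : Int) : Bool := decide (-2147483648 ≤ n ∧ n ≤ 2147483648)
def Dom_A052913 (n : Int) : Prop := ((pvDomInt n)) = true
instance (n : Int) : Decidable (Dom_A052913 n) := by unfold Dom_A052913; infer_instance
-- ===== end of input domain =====

-- B replaces A's (k, current) auxiliary state with the sequence's linear recurrence
-- a(i) = 5*a(i-1) - 2*a(i-2) (seeds 1, 4), carrying only the last two output terms: simpler.


-- ===== PORT A =====
-- while len(marked) < n: each iteration appends exactly one element starting from [],
-- so the loop runs exactly n.toNat times (0 for n ≤ 0); fuel = n.toNat is exact.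
-- Python's O(1) list.append is encoded as cons onto the reversed accumulator,
-- reversed once at exit (Lean's ++ is linear; the emitted values are the same).
def A052913_loop : Nat → List Int → Int → Int → List Int
  | 0, marked, _, _ => marked.reverse
  | fuel + 1, marked, k, current =>
      let marked' := k :: marked
      let k' := k + (k + current + 1)
      let current' := current + 2 * k'
      A052913_loop fuel marked' k' current'

def A052913 (n : Int) : List Int :=
  A052913_loop n.toNat [] 1 1

-- ===== PORT B =====
-- while len(res) < n starting from [1,4]: runs exactly n.toNat - 2 times when n ≥ 2;
-- res.append encoded the same way (reversed accumulator, reversed once at exit).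
def A052913_alt_loop : Nat → List Int → Int → Int → List Int
  | 0, res, _, _ => res.reverse
  | fuel + 1, res, a, b =>
      let a' := 5 * a - 2 * b
      A052913_alt_loop fuel (a' :: res) a' a

def A052913_alt (n : Int) : List Int :=
  if n ≤ 0 then []
  else if n = 1 then [1]
  else A052913_alt_loop (n.toNat - 2) [4, 1] 4 1

-- ===== PRECONDITION & SPEC =====
def Spec_A052913 (n : Int) (out : List Int) : Prop := out = A052913_alt n
instance (n : Int) (out : List Int) : Decidable (Spec_A052913 n out) := by unfold Spec_A052913; infer_instance

-- ===== CLAIM (what is proved, stated in full; the proofs are below) =====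
def Claim_equal_A052913 : Prop := ∀ (n : Int), Dom_A052913 n → Spec_A052913 n (A052913 n)

-- ===== LEMMAS AND PROOFS =====

-- A's state (k, current) determines B's state: current = 3*k - 2*b - 1 where b is the
-- previously emitted term; both loops then emit the same next element each step.
theorem A052913_loop_eq_alt (fuel : Nat) : ∀ (acc : List Int) (k b : Int),
    A052913_loop (fuel + 1) acc k (3 * k - 2 * b - 1)
      = A052913_alt_loop fuel (k :: acc) k b := by
  induction fuel with
  | zero =>
      intro acc k b
      simp [A052913_loop, A052913_alt_loop]
  | succ m ih =>
      intro acc k b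
      have h1 : A052913_loop (m + 1 + 1) acc k (3 * k - 2 * b - 1)
          = A052913_loop (m + 1) (k :: acc) (5 * k - 2 * b)
              (3 * (5 * k - 2 * b) - 2 * k - 1) := by
        show A052913_loop (m + 1)
            (k :: acc) (k + (k + (3 * k - 2 * b - 1) + 1))
            ((3 * k - 2 * b - 1) + 2 * (k + (k + (3 * k - 2 * b - 1) + 1)))
          = _
        congr 1 <;> ring
      rw [h1, ih (k :: acc) (5 * k - 2 * b) k]
      rfl

-- ===== VERDICT (by name: the statement is the Claim_ definition above) =====
theorem A052913_spec : Claim_equal_A052913 := by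
  intro n _
  unfold Spec_A052913 A052913 A052913_alt
  by_cases h0 : n ≤ 0
  · have : n.toNat = 0 := Int.toNat_of_nonpos h0
    simp [this, h0, A052913_loop]
  · by_cases h1 : n = 1
    · simp [h1, A052913_loop]
    · have hn : 2 ≤ n := by omega
      have ht : n.toNat = (n.toNat - 2) + 1 + 1 := by omega
      rw [ht]
      have hstep : A052913_loop ((n.toNat - 2) + 1 + 1) [] 1 1
          = A052913_loop ((n.toNat - 2) + 1) [1] 4 9 := by
        show A052913_loop ((n.toNat - 2) + 1) ([(1:Int)])
            (1 + (1 + 1 + 1)) (1 + 2 * (1 + (1 + 1 + 1))) = _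
        norm_num
      rw [hstep]
      have := A052913_loop_eq_alt (n.toNat - 2) [1] 4 1
      norm_num at this
      rw [this]
      simp [h0, h1]
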